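-- pv_equiv track=rewrite | github.com/zlizpro/MyCRM | .kiro/hooks/scripts/test_sample.py | processCustomerData
-- ===== SOURCE A (Python) =====
-- def processCustomerData(data):  # 函数名应该使用下划线命名，缺少类型注解和文档字符串
--     if not data:
--         return None
--
--     result = {}
--     for key, value in data.items():
--         if key == 'name':
--             result['customer_name'] = value.strip().title()
--         elif key == 'phone':
--             result['customer_phone'] = value.replace('-', '').replace(' ', '')
--         elif key == 'email':
--             result['customer_email'] = value.lower().strip()
--
--     return result
-- ===== SOURCE B (Python) =====
-- def _convert(key, value):
--     if key == 'name':
--         return {'customer_name': value.strip().title()}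
--     if key == 'phone':
--         return {'customer_phone': value.replace('-', '').replace(' ', '')}
--     if key == 'email':
--         return {'customer_email': value.lower().strip()}
--     return {}
--
--
-- def processCustomerData(data):
--     if not data:
--         return None
--     result = {}
--     for key, value in reversed(list(data.items())):
--         result = {**_convert(key, value), **result}
--     return result
-- ===== Notes on version B (the rewrite author's own statement) =====
-- stated objective: alternative
-- what changed: A's forward loop with an if/elif chain mutating one result dict in place is replaced by a back-to-front pass that converts each item to a singleton dict and combines them with dict union {**head, **tail}, which reproduces first-occurrence key order with last-value-wins.
import Mathlib
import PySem

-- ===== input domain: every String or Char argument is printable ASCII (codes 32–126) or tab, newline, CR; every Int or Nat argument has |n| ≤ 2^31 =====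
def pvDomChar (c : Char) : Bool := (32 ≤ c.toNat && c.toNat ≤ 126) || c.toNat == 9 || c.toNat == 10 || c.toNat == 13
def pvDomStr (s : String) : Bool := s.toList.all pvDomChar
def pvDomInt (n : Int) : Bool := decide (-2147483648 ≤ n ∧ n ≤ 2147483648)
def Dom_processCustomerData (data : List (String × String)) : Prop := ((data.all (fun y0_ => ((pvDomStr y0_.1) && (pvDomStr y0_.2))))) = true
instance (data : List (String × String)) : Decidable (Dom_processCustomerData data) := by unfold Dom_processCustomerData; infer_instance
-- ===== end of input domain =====

-- B replaces A's forward loop (if/elif chain mutating one result dict in place) by a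
-- back-to-front pass over reversed(items), combining per-item singleton dicts with dict
-- union {**head, **tail} (objective: alternative decomposition, same result).

-- Hand port of Python's str.title(), exact on the ASCII letters of Dom: a letter is
-- uppercased after a non-letter and lowercased after a letter (shared by both ports,
-- since both Pythons call .title()).
def pyTitleGo : Bool → List Char → List Char
  | _, [] => []
  | prev, c :: cs =>
    if PySem.Chars.isalpha c then
      (if prev then PySem.Chars.lowerChar c else PySem.Chars.upperChar c) :: pyTitleGo true cs
    else
      c :: pyTitleGo false cs

def pyTitle (s : String) : String := String.ofList (pyTitleGo false s.toList)

-- ===== PORT A =====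
def processCustomerData (data : List (String × String)) : Option (List (String × String)) :=
  if data.isEmpty then none
  else
    some ((data.foldl (fun (result : PySem.Dict String String) p =>
      if p.1 == "name" then result.insert "customer_name" (pyTitle (PySem.Str.strip p.2))
      else if p.1 == "phone" then result.insert "customer_phone" (PySem.Str.replace (PySem.Str.replace p.2 "-" "") " " "")
      else if p.1 == "email" then result.insert "customer_email" (PySem.Str.strip (PySem.Str.lower p.2))
      else result) PySem.Dict.empty).items)

-- ===== PORT B =====
-- _convert: one item becomes a singleton dict (or an empty dict for an unknown key)
def pvConvert (key value : String) : PySem.Dict String String :=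
  if key == "name" then PySem.Dict.empty.insert "customer_name" (pyTitle (PySem.Str.strip value))
  else if key == "phone" then PySem.Dict.empty.insert "customer_phone" (PySem.Str.replace (PySem.Str.replace value "-" "") " " "")
  else if key == "email" then PySem.Dict.empty.insert "customer_email" (PySem.Str.strip (PySem.Str.lower value))
  else PySem.Dict.empty

-- {**a, **b}: b's entries inserted into a (overwrite keeps a's position, new keys append)
def pvUnion (a b : PySem.Dict String String) : PySem.Dict String String :=
  b.items.foldl (fun acc q => acc.insert q.1 q.2) a

def processCustomerData_alt (data : List (String × String)) : Option (List (String × String)) :=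
  if data.isEmpty then none
  else
    some ((data.reverse.foldl (fun result p => pvUnion (pvConvert p.1 p.2) result)
      PySem.Dict.empty).items)

-- ===== PRECONDITION & SPEC =====
def Spec_processCustomerData (data : List (String × String)) (out : Option (List (String × String))) : Prop := out = processCustomerData_alt data
instance (data : List (String × String)) (out : Option (List (String × String))) : Decidable (Spec_processCustomerData data out) := by unfold Spec_processCustomerData; infer_instance

-- ===== CLAIM =====
def Claim_equal_processCustomerData : Prop := ∀ (data : List (String × String)), Dom_processCustomerData data → Spec_processCustomerData data (processCustomerData data)

-- ===== LEMMAS AND PROOFS =====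

-- proof helper: B's reversed loop as structural recursion over the items
def pvMerge : List (String × String) → PySem.Dict String String
  | [] => PySem.Dict.empty
  | (key, value) :: rest => pvUnion (pvConvert key value) (pvMerge rest)

theorem revfold_eq_pvMerge (items : List (String × String)) :
    items.reverse.foldl (fun result p => pvUnion (pvConvert p.1 p.2) result)
      PySem.Dict.empty = pvMerge items := by
  rw [List.foldl_reverse]
  induction items with
  | nil => rfl
  | cons p rest ih =>
    cases p with
    | mk k v => rw [List.foldr_cons, ih]; rfl

-- inserting k past a fold whose keys avoid k, when k is already present (overwrite keeps position)
theorem insert_comm_of_contains (d : PySem.Dict String String) (k v q1 q2 : String)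
    (hd : d.contains k = true) (hq : q1 ≠ k) :
    (d.insert q1 q2).insert k v = (d.insert k v).insert q1 q2 := by
  apply PySem.Dict.ext
  have h1 : (d.insert q1 q2).contains k = true := by
    simp [PySem.Dict.contains_insert, hd]
  have h2 : (d.insert k v).contains q1 = d.contains q1 := by
    simp [PySem.Dict.contains_insert, hq]
  by_cases hq1 : d.contains q1 = true
  · rw [PySem.Dict.items_insert_of_contains _ _ h1,
        PySem.Dict.items_insert_of_contains _ _ hq1,
        PySem.Dict.items_insert_of_contains _ _ (h2 ▸ hq1),
        PySem.Dict.items_insert_of_contains _ _ hd,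
        List.map_map, List.map_map]
    apply List.map_congr_left
    intro p _
    simp only [Function.comp_apply]
    by_cases hpk : p.1 = k <;> by_cases hpq : p.1 = q1 <;>
      simp_all [Ne.symm hq]
  · have hq1' : d.contains q1 = false := by simpa using hq1
    rw [PySem.Dict.items_insert_of_contains _ _ h1,
        PySem.Dict.items_insert_of_not_contains _ _ hq1',
        PySem.Dict.items_insert_of_not_contains _ _ (h2 ▸ hq1'),
        PySem.Dict.items_insert_of_contains _ _ hd,
        List.map_append]
    simp [hq]

theorem insert_fold_of_contains (L : List (String × String)) (d : PySem.Dict String String)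
    (k v : String) (hd : d.contains k = true) (hL : k ∉ L.map (·.1)) :
    (L.foldl (fun acc q => acc.insert q.1 q.2) d).insert k v =
      L.foldl (fun acc q => acc.insert q.1 q.2) (d.insert k v) := by
  induction L generalizing d with
  | nil => rfl
  | cons q L ih =>
    simp only [List.map_cons, List.mem_cons, not_or] at hL
    simp only [List.foldl_cons]
    rw [ih _ (by simp [PySem.Dict.contains_insert, hd]) hL.2,
        insert_comm_of_contains d k v q.1 q.2 hd (fun h => hL.1 h.symm)]

theorem insert_fold_map (L : List (String × String)) (d : PySem.Dict String String)
    (k v : String) (hnd : (L.map (·.1)).Nodup) (hk : k ∈ L.map (·.1)) :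
    (L.foldl (fun acc q => acc.insert q.1 q.2) d).insert k v =
      (L.map (fun p => if p.1 == k then (k, v) else p)).foldl
        (fun acc q => acc.insert q.1 q.2) d := by
  induction L generalizing d with
  | nil => simp at hk
  | cons p L ih =>
    simp only [List.map_cons, List.mem_cons] at hk
    simp only [List.map_cons, List.nodup_cons] at hnd
    by_cases hpk : p.1 = k
    · have hLk : k ∉ L.map (·.1) := hpk ▸ hnd.1
      have hmap : L.map (fun q => if q.1 == k then (k, v) else q) = L := by
        rw [List.map_congr_left (g := id), List.map_id]
        intro q hq
        have hne : q.1 ≠ k := fun h => hLk (h ▸ List.mem_map_of_mem hq)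
        simp [hne]
      have hbeq : (p.1 == k) = true := by simp [hpk]
      simp only [List.map_cons, List.foldl_cons, hbeq, if_true, hmap]
      have hcont : (d.insert p.1 p.2).contains k = true := by
        rw [hpk] at *
        exact PySem.Dict.contains_insert_self d k p.2
      rw [insert_fold_of_contains L _ k v hcont hLk]
      congr 1
      rw [show d.insert p.1 p.2 = d.insert k p.2 from by rw [hpk],
          PySem.Dict.insert_insert_self]
    · have hk' : k ∈ L.map (·.1) := by
        rcases hk with h | h
        · exact absurd h.symm hpk
        · exact h
      simp only [List.map_cons, List.foldl_cons]
      have : (p.1 == k) = false := by simp [hpk]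
      rw [this]
      simp only [Bool.false_eq_true, if_false]
      exact ih _ hnd.2 hk' 

-- pvUnion then insert = insert on the right argument
theorem union_insert (d c : PySem.Dict String String) (k v : String) (hnd : c.keys.Nodup) :
    pvUnion d (c.insert k v) = (pvUnion d c).insert k v := by
  unfold pvUnion
  by_cases hc : c.contains k = true
  · have hnd' : (c.items.map (·.1)).Nodup := by
      simpa [PySem.Dict.keys] using hnd
    have hk : k ∈ c.items.map (·.1) := by
      have := (PySem.Dict.contains_iff_mem_keys (d := c) (k := k)).mp hc
      simpa [PySem.Dict.keys] using this
    rw [PySem.Dict.items_insert_of_contains _ _ hc, ← insert_fold_map c.items d k v hnd' hk]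
  · have hc' : c.contains k = false := by simpa using hc
    rw [PySem.Dict.items_insert_of_not_contains _ _ hc', List.foldl_append]
    rfl

-- associativity of dict union (right argument built by inserts)
theorem fold_union (L : List (String × String)) (d c : PySem.Dict String String)
    (hnd : c.keys.Nodup) :
    L.foldl (fun acc q => acc.insert q.1 q.2) (pvUnion d c) =
      pvUnion d (L.foldl (fun acc q => acc.insert q.1 q.2) c) := by
  induction L generalizing c with
  | nil => rfl
  | cons p L ih =>
    simp only [List.foldl_cons]
    rw [← union_insert d c p.1 p.2 hnd, ih _ (PySem.Dict.nodup_keys_insert c p.1 p.2 hnd)]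

theorem nodup_keys_pvConvert (k v : String) : (pvConvert k v).keys.Nodup := by
  unfold pvConvert
  split_ifs <;> simp [PySem.Dict.keys_insert_of_not_contains, PySem.Dict.contains_empty,
    PySem.Dict.keys_empty]

theorem nodup_keys_pvMerge (items : List (String × String)) : (pvMerge items).keys.Nodup := by
  cases items with
  | nil => simp [pvMerge, PySem.Dict.keys_empty]
  | cons p rest =>
    cases p with
    | mk k v =>
      exact PySem.Dict.nodup_keys_foldl_insert_key (pvMerge rest).items (fun q => q.1)
        (fun d q => q.2) (pvConvert k v) (nodup_keys_pvConvert k v)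

theorem union_empty (t : PySem.Dict String String) (hnd : t.keys.Nodup) :
    pvUnion PySem.Dict.empty t = t := by
  apply PySem.Dict.ext
  have hnd' : (t.items.map (fun q => q.1)).Nodup := by
    simpa [PySem.Dict.keys] using hnd
  have h := PySem.Dict.items_foldl_insert_fresh t.items (fun q => q.1) (fun q => q.2)
    PySem.Dict.empty (fun a _ => by simp [PySem.Dict.contains_empty]) hnd'
  unfold pvUnion
  rw [h]
  simp [PySem.Dict.empty]

theorem foldA_eq (items : List (String × String)) :
    ∀ (d : PySem.Dict String String),
      items.foldl (fun result p =>
        if p.1 == "name" then result.insert "customer_name" (pyTitle (PySem.Str.strip p.2))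
        else if p.1 == "phone" then result.insert "customer_phone" (PySem.Str.replace (PySem.Str.replace p.2 "-" "") " " "")
        else if p.1 == "email" then result.insert "customer_email" (PySem.Str.strip (PySem.Str.lower p.2))
        else result) d = pvUnion d (pvMerge items) := by
  induction items with
  | nil => intro d; rfl
  | cons p rest ih =>
    intro d
    cases p with
    | mk k v =>
      simp only [List.foldl_cons]
      rw [ih]
      have hstep : (if k == "name" then d.insert "customer_name" (pyTitle (PySem.Str.strip v))
          else if k == "phone" then d.insert "customer_phone" (PySem.Str.replace (PySem.Str.replace v "-" "") " " "")
          else if k == "email" then d.insert "customer_email" (PySem.Str.strip (PySem.Str.lower v))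
          else d) = pvUnion d (pvConvert k v) := by
        unfold pvConvert pvUnion
        split_ifs <;> rfl
      rw [hstep]
      exact fold_union (pvMerge rest).items d (pvConvert k v) (nodup_keys_pvConvert k v)

-- ===== VERDICT =====
theorem processCustomerData_spec : Claim_equal_processCustomerData := by
  intro data _
  unfold Spec_processCustomerData processCustomerData processCustomerData_alt
  by_cases h : data.isEmpty
  · simp [h]
  · simp only [h, Bool.false_eq_true, if_false]
    rw [foldA_eq, union_empty _ (nodup_keys_pvMerge data), revfold_eq_pvMerge]
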